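-- pv_equiv track=rewrite | github.com/Ohayoung1/CordingMasters | Beginner/bg23.py | is_constructible_polygon
-- ===== SOURCE A (Python) =====
-- def is_constructible_polygon(k):
--     if k < 3:
--         return "NO"
--
--     # 페르마 소수 목록
--     fermat_primes = [3, 5, 17, 257, 65537]
--
--     # k를 페르마 소수의 곱으로 나누기
--     for prime in fermat_primes:
--         count = 0  # 각 소수의 나눌 수 있는 횟수
--         while k % prime == 0:
--             k //= prime
--             count += 1
--         # 페르마 소수가 제곱 이상으로 나누어진 경우
--         if count >= 2:
--             return "NO"
--
--     # k가 2인 경우도 NO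
--     if k == 2:
--         return "NO"
--
--     # k를 2의 거듭제곱으로 나누기
--     while k % 2 == 0:
--         k //= 2
--
--     # 남은 k가 1이면 "YES", 아니면 "NO"
--     return "YES" if k == 1 else "NO"
-- ===== SOURCE B (Python) =====
-- def is_constructible_polygon(k):
--     # A regular k-gon is constructible iff k >= 3 and the odd part of k
--     # divides 3*5*17*257*65537 = 4294967295 (product of the known Fermat primes).
--     if k < 3:
--         return "NO"
--     while k % 2 == 0:
--         k //= 2
--     return "YES" if 4294967295 % k == 0 else "NO"
-- ===== Notes on version B (the rewrite author's own statement) =====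
-- stated objective: simpler
-- what changed: B replaces A's per-Fermat-prime trial-division loops plus final power-of-2 strip by one loop stripping factors of 2 and a single divisibility test of the odd part into the constant 4294967295 = 3*5*17*257*65537 (whose divisors are exactly the products of distinct Fermat primes).
-- intended difference: On k = 2*d with d a divisor of 4294967295 greater than 1 (k ≡ 2 mod 4 and k/2 | 4294967295), A's accidental mid-function k==2 check makes it return 'NO', while B returns 'YES', which is the intended answer: e.g. the regular hexagon k=6 is classically constructible. — e.g. on is_constructible_polygon(6): A returns "NO", B returns "YES"
import Mathlib
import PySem

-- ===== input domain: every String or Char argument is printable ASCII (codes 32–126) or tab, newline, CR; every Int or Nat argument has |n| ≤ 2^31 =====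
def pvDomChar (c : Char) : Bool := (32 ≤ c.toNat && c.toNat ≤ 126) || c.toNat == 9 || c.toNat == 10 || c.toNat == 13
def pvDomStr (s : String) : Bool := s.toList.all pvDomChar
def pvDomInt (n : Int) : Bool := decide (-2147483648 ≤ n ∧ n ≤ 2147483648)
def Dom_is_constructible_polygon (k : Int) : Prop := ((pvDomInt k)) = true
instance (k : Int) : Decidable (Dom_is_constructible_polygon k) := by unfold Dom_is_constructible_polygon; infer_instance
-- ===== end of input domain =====

-- B does the same job as A by a different algorithm (simpler): strip factors of 2, then one
-- divisibility test of the odd part into 4294967295 = 3*5*17*257*65537; B fixes A's wrong "NO"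
-- on k = 2*d with d > 1 a divisor of 4294967295 (see D_ below).

-- ===== PORT A =====
-- while k % prime == 0: k //= prime; count += 1   (the '0 < k ∧ 2 ≤ p' guard only makes the
-- recursion total; it holds whenever A's Python reaches this loop, so behaviour is unchanged)
def pvDivLoopA (p k cnt : Int) : Int × Int :=
  if h : 0 < k ∧ 2 ≤ p ∧ PySem.Int.mod k p = 0 then
    pvDivLoopA p (PySem.Int.floordiv k p) (cnt + 1)
  else (k, cnt)
termination_by k.toNat
decreasing_by
  rw [PySem.Int.floordiv_eq_ediv_of_pos (by omega)]
  obtain ⟨hk, hp, hm⟩ := h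
  obtain ⟨q, hq⟩ := (PySem.Int.mod_eq_zero_iff_dvd k p).mp hm
  rw [hq, Int.mul_ediv_cancel_left _ (by omega)]
  rw [hq] at hk
  have hq0 : 0 < q := by nlinarith
  have : q < p * q := by nlinarith
  omega

-- the 'for prime in fermat_primes' loop; 'none' = the 'return "NO"' when count >= 2
def pvFermatFoldA : List Int → Int → Option Int
  | [], k => some k
  | p :: ps, k =>
    let r := pvDivLoopA p k 0
    if r.2 ≥ 2 then none else pvFermatFoldA ps r.1

-- while k % 2 == 0: k //= 2   (same totality guard remark as above)
def pvStrip2A (k : Int) : Int :=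
  if h : 0 < k ∧ PySem.Int.mod k 2 = 0 then pvStrip2A (PySem.Int.floordiv k 2) else k
termination_by k.toNat
decreasing_by
  rw [PySem.Int.floordiv_eq_ediv_of_pos (by omega)]
  obtain ⟨hk, hm⟩ := h
  obtain ⟨q, hq⟩ := (PySem.Int.mod_eq_zero_iff_dvd k 2).mp hm
  rw [hq, Int.mul_ediv_cancel_left _ (by omega)]
  omega

def is_constructible_polygon (k : Int) : String :=
  if k < 3 then "NO"
  else
    match pvFermatFoldA [3, 5, 17, 257, 65537] k with
    | none => "NO"
    | some k1 =>
      if k1 = 2 then "NO"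
      else if pvStrip2A k1 = 1 then "YES" else "NO"

-- ===== PORT B =====
-- while k % 2 == 0: k //= 2   (totality guard '0 < k' as above; B only calls this with k ≥ 3)
def pvOddPartB (k : Int) : Int :=
  if h : 0 < k ∧ PySem.Int.mod k 2 = 0 then pvOddPartB (PySem.Int.floordiv k 2) else k
termination_by k.toNat
decreasing_by
  rw [PySem.Int.floordiv_eq_ediv_of_pos (by omega)]
  obtain ⟨hk, hm⟩ := h
  obtain ⟨q, hq⟩ := (PySem.Int.mod_eq_zero_iff_dvd k 2).mp hm
  rw [hq, Int.mul_ediv_cancel_left _ (by omega)]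
  omega

def is_constructible_polygon_alt (k : Int) : String :=
  if k < 3 then "NO"
  else if PySem.Int.mod 4294967295 (pvOddPartB k) = 0 then "YES" else "NO"

-- ===== PRECONDITION & SPEC =====
-- On k = 2*d with d a divisor of 4294967295 greater than 1 (k ≡ 2 mod 4 and k/2 ∣ 4294967295),
-- A's accidental mid-function k==2 check makes it return "NO", while B returns "YES", which is
-- the intended answer: e.g. the regular hexagon k = 6 is classically constructible.
def D_is_constructible_polygon (k : Int) : Prop :=
  2 < k ∧ k % 4 = 2 ∧ (k / 2) ∣ 4294967295
instance (k : Int) : Decidable (D_is_constructible_polygon k) := by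
  unfold D_is_constructible_polygon; infer_instance

def Spec_is_constructible_polygon (k : Int) (out : String) : Prop :=
  ¬ D_is_constructible_polygon k → out = is_constructible_polygon_alt k
instance (k : Int) (out : String) : Decidable (Spec_is_constructible_polygon k out) := by
  unfold Spec_is_constructible_polygon; infer_instance

def pvDiffWitness_is_constructible_polygon : Int := 6
def pvDiffWitnessOut_is_constructible_polygon : String × String := ("NO", "YES")

-- ===== CLAIM (what is proved, stated in full; the proofs are below) =====
def Claim_unchanged_is_constructible_polygon : Prop := ∀ (k : Int), Dom_is_constructible_polygon k → Spec_is_constructible_polygon k (is_constructible_polygon k)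
def Claim_changed_is_constructible_polygon : Prop := Dom_is_constructible_polygon (pvDiffWitness_is_constructible_polygon) ∧ D_is_constructible_polygon (pvDiffWitness_is_constructible_polygon) ∧ is_constructible_polygon (pvDiffWitness_is_constructible_polygon) = pvDiffWitnessOut_is_constructible_polygon.1 ∧ is_constructible_polygon_alt (pvDiffWitness_is_constructible_polygon) = pvDiffWitnessOut_is_constructible_polygon.2 ∧ pvDiffWitnessOut_is_constructible_polygon.1 ≠ pvDiffWitnessOut_is_constructible_polygon.2
def Claim_exact_is_constructible_polygon : Prop := ∀ (k : Int), Dom_is_constructible_polygon k → D_is_constructible_polygon k → is_constructible_polygon k ≠ is_constructible_polygon_alt k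

-- ===== LEMMAS AND PROOFS =====

-- the division loop computes the p-adic decomposition of k
lemma pvDivLoopA_spec (p k c : Int) (hp : 2 ≤ p) (hk : 0 < k) :
    ∃ (q : Int) (e : ℕ), pvDivLoopA p k c = (q, c + e) ∧ k = q * p ^ e ∧ ¬ p ∣ q ∧ 0 < q := by
  induction k, c using pvDivLoopA.induct (p := p) with
  | case1 k c h ih =>
    obtain ⟨hk0, hp0, hm⟩ := h
    obtain ⟨q0, hq0⟩ := (PySem.Int.mod_eq_zero_iff_dvd k p).mp hm
    have hdiv : PySem.Int.floordiv k p = q0 := by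
      rw [PySem.Int.floordiv_eq_ediv_of_pos (by omega), hq0,
        Int.mul_ediv_cancel_left _ (by omega)]
    have hq0pos : 0 < q0 := by nlinarith [hq0 ▸ hk0]
    obtain ⟨q, e, h1, h2, h3, h4⟩ := ih (by rwa [hdiv])
    refine ⟨q, e + 1, ?_, ?_, h3, h4⟩
    · have hc : 0 < k ∧ 2 ≤ p ∧ PySem.Int.mod k p = 0 := ⟨hk0, hp0, hm⟩
      rw [pvDivLoopA, dif_pos hc, h1]
      congr 1
      push_cast
      ring
    · rw [hdiv] at h2
      rw [hq0, h2]
      ring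
  | case2 k c h =>
    refine ⟨k, 0, ?_, by ring, ?_, hk⟩
    · rw [pvDivLoopA, dif_neg h]
      simp
    · intro hd
      exact h ⟨hk, hp, (PySem.Int.mod_eq_zero_iff_dvd k p).mpr hd⟩

-- uniqueness of the p-adic decomposition
lemma pvValUnique (p : Int) (hp : 2 ≤ p) :
    ∀ (e : ℕ) (q : Int) (e' : ℕ) (q' : Int), ¬ p ∣ q → ¬ p ∣ q' →
      q * p ^ e = q' * p ^ e' → e = e' ∧ q = q' := by
  intro e
  induction e with
  | zero =>
    intro q e' q' hq hq' heq
    cases e' with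
    | zero => simpa using heq
    | succ s =>
      exfalso
      apply hq
      rw [pow_zero, mul_one] at heq
      rw [heq]
      exact ⟨q' * p ^ s, by ring⟩
  | succ s ih =>
    intro q e' q' hq hq' heq
    cases e' with
    | zero =>
      exfalso
      apply hq'
      rw [pow_zero, mul_one] at heq
      rw [← heq]
      exact ⟨q * p ^ s, by ring⟩
    | succ s' =>
      have hcancel : q * p ^ s = q' * p ^ s' := by
        rw [pow_succ, pow_succ, ← mul_assoc, ← mul_assoc] at heq
        exact mul_right_cancel₀ (by omega) heq
      obtain ⟨h1, h2⟩ := ih q s' q' hq hq' hcancel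
      exact ⟨by omega, h2⟩

-- determinism corollary: a decomposition determines the loop's output
lemma pvDivLoopA_eq (p k : Int) (hp : 2 ≤ p) (hk : 0 < k) (q : Int) (e : ℕ)
    (hdec : k = q * p ^ e) (hq : ¬ p ∣ q) : pvDivLoopA p k 0 = (q, (e : Int)) := by
  obtain ⟨q', e', h1, h2, h3, _⟩ := pvDivLoopA_spec p k 0 hp hk
  obtain ⟨he, hqq⟩ := pvValUnique p hp e' q' e q h3 hq (by rw [← h2, hdec])
  rw [h1, hqq, he]
  simp

lemma pvStrip2A_odd_mul_pow (a : ℕ) (m : Int) (hm : 0 < m) (ho : ¬ (2 : Int) ∣ m) :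
    pvStrip2A (2 ^ a * m) = m := by
  induction a with
  | zero =>
    rw [pvStrip2A, dif_neg]
    · ring
    · intro h
      exact ho (by simpa using (PySem.Int.mod_eq_zero_iff_dvd _ 2).mp h.2)
  | succ s ih =>
    have hcond : 0 < 2 ^ (s + 1) * m ∧ PySem.Int.mod (2 ^ (s + 1) * m) 2 = 0 :=
      ⟨by positivity, (PySem.Int.mod_eq_zero_iff_dvd _ 2).mpr ⟨2 ^ s * m, by ring⟩⟩
    rw [pvStrip2A, dif_pos hcond, PySem.Int.floordiv_eq_ediv_of_pos (by norm_num),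
      (by ring : (2:Int) ^ (s + 1) * m = 2 * (2 ^ s * m)),
      Int.mul_ediv_cancel_left _ (by norm_num)]
    exact ih

lemma pvOddPartB_odd_mul_pow (a : ℕ) (m : Int) (hm : 0 < m) (ho : ¬ (2 : Int) ∣ m) :
    pvOddPartB (2 ^ a * m) = m := by
  induction a with
  | zero =>
    rw [pvOddPartB, dif_neg]
    · ring
    · intro h
      exact ho (by simpa using (PySem.Int.mod_eq_zero_iff_dvd _ 2).mp h.2)
  | succ s ih =>
    have hcond : 0 < 2 ^ (s + 1) * m ∧ PySem.Int.mod (2 ^ (s + 1) * m) 2 = 0 :=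
      ⟨by positivity, (PySem.Int.mod_eq_zero_iff_dvd _ 2).mpr ⟨2 ^ s * m, by ring⟩⟩
    rw [pvOddPartB, dif_pos hcond, PySem.Int.floordiv_eq_ediv_of_pos (by norm_num),
      (by ring : (2:Int) ^ (s + 1) * m = 2 * (2 ^ s * m)),
      Int.mul_ediv_cancel_left _ (by norm_num)]
    exact ih

lemma pvOddPartB_spec (k : Int) (hk : 0 < k) :
    ∃ a : ℕ, k = 2 ^ a * pvOddPartB k ∧ ¬ (2 : Int) ∣ pvOddPartB k ∧ 0 < pvOddPartB k := by
  induction k using pvOddPartB.induct with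
  | case1 k h ih =>
    obtain ⟨hk0, hm⟩ := h
    obtain ⟨q0, hq0⟩ := (PySem.Int.mod_eq_zero_iff_dvd k 2).mp hm
    have hdiv : PySem.Int.floordiv k 2 = q0 := by
      rw [PySem.Int.floordiv_eq_ediv_of_pos (by norm_num), hq0,
        Int.mul_ediv_cancel_left _ (by norm_num)]
    obtain ⟨a, h1, h2, h3⟩ := ih (by rw [hdiv]; omega)
    rw [hdiv] at h1 h2 h3
    have hfold : pvOddPartB k = pvOddPartB q0 := by
      rw [pvOddPartB, dif_pos ⟨hk0, hm⟩, hdiv]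
    refine ⟨a + 1, ?_, by rw [hfold]; exact h2, by rw [hfold]; exact h3⟩
    rw [hfold, hq0]
    linear_combination (2 : Int) * h1
  | case2 k h =>
    have hfix : pvOddPartB k = k := by rw [pvOddPartB, dif_neg h]
    refine ⟨0, by rw [hfix]; ring, ?_, by omega⟩
    rw [hfix]
    intro hd
    exact h ⟨hk, (PySem.Int.mod_eq_zero_iff_dvd k 2).mpr hd⟩

lemma pvStrip2A_spec (k : Int) (hk : 0 < k) :
    ∃ a : ℕ, k = 2 ^ a * pvStrip2A k ∧ ¬ (2 : Int) ∣ pvStrip2A k ∧ 0 < pvStrip2A k := by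
  induction k using pvStrip2A.induct with
  | case1 k h ih =>
    obtain ⟨hk0, hm⟩ := h
    obtain ⟨q0, hq0⟩ := (PySem.Int.mod_eq_zero_iff_dvd k 2).mp hm
    have hdiv : PySem.Int.floordiv k 2 = q0 := by
      rw [PySem.Int.floordiv_eq_ediv_of_pos (by norm_num), hq0,
        Int.mul_ediv_cancel_left _ (by norm_num)]
    obtain ⟨a, h1, h2, h3⟩ := ih (by rw [hdiv]; omega)
    rw [hdiv] at h1 h2 h3
    have hfold : pvStrip2A k = pvStrip2A q0 := by
      rw [pvStrip2A, dif_pos ⟨hk0, hm⟩, hdiv]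
    refine ⟨a + 1, ?_, by rw [hfold]; exact h2, by rw [hfold]; exact h3⟩
    rw [hfold, hq0]
    linear_combination (2 : Int) * h1
  | case2 k h =>
    have hfix : pvStrip2A k = k := by rw [pvStrip2A, dif_neg h]
    refine ⟨0, by rw [hfix]; ring, ?_, by omega⟩
    rw [hfix]
    intro hd
    exact h ⟨hk, (PySem.Int.mod_eq_zero_iff_dvd k 2).mpr hd⟩

lemma pvPrimeNotDvdProd (p : Int) (hp : Prime p) :
    ∀ (l : List Int), (∀ q ∈ l, ¬ p ∣ q) → ¬ p ∣ l.prod := by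
  intro l
  induction l with
  | nil =>
    intro _ hd
    exact hp.not_dvd_one (by simpa using hd)
  | cons x xs ih =>
    intro hall hd
    rcases hp.dvd_mul.mp (by simpa using hd) with h | h
    · exact hall x (by simp) h
    · exact ih (fun q hq => hall q (by simp [hq])) h

-- main computation lemma: on k = 2^a * m with m > 0 dividing the product of the (distinct,
-- odd, prime) list elements, the Fermat fold removes each of them once and returns 2^a
lemma pvFoldOfDiv :
    ∀ (ps : List Int) (a : ℕ) (m : Int),
      (∀ p ∈ ps, Prime p ∧ 2 < p) → ps.Pairwise (fun x y => ¬ x ∣ y) →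
      0 < m → m ∣ ps.prod → pvFermatFoldA ps (2 ^ a * m) = some (2 ^ a) := by
  intro ps
  induction ps with
  | nil =>
    intro a m _ _ hm hd
    have hle := Int.le_of_dvd one_pos (by simpa using hd)
    have hm1 : m = 1 := by omega
    simp [pvFermatFoldA, hm1]
  | cons p rest ih =>
    intro a m hprime hpw hm hd
    obtain ⟨hp, hp2⟩ := hprime p (by simp)
    have hrest : ∀ q ∈ rest, Prime q ∧ 2 < q := fun q hq => hprime q (by simp [hq])
    have hpwrest := (List.pairwise_cons.mp hpw).2
    have hndR : ¬ p ∣ rest.prod :=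
      pvPrimeNotDvdProd p hp rest (List.pairwise_cons.mp hpw).1
    have hd' : m ∣ p * rest.prod := by simpa using hd
    have hp2n : ¬ p ∣ (2 : Int) := fun h => by have := Int.le_of_dvd (by norm_num) h; omega
    have hpnotpow : ∀ b : ℕ, ¬ p ∣ (2 : Int) ^ b := fun b h => hp2n (hp.dvd_of_dvd_pow h)
    have hpne : (p : Int) ≠ 0 := by omega
    by_cases hpm : p ∣ m
    · obtain ⟨m2, hm2⟩ := hpm
      have hm2pos : 0 < m2 := by nlinarith [hm2 ▸ hm]
      have hpm2 : ¬ p ∣ m2 := by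
        rintro ⟨t, ht⟩
        apply hndR
        have h1 : p * (p * t) ∣ p * rest.prod := by
          rw [← ht, ← hm2]
          exact hd'
        have h2 : p * t ∣ rest.prod := (Int.mul_dvd_mul_iff_left hpne).mp h1
        exact dvd_trans ⟨t, rfl⟩ h2
      have hnq : ¬ p ∣ 2 ^ a * m2 := by
        intro h
        rcases hp.dvd_mul.mp h with h | h
        · exact hpnotpow a h
        · exact hpm2 h
      have hloop : pvDivLoopA p (2 ^ a * m) 0 = (2 ^ a * m2, (1 : Int)) := by
        have := pvDivLoopA_eq p (2 ^ a * m) (by omega) (by positivity) (2 ^ a * m2) 1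
          (by rw [hm2]; ring) hnq
        simpa using this
      have hm2d : m2 ∣ rest.prod := by
        refine (Int.mul_dvd_mul_iff_left hpne).mp ?_
        rw [← hm2]
        exact hd'
      rw [pvFermatFoldA]
      simp only [hloop]
      norm_num
      exact ih a m2 hrest hpwrest hm2pos hm2d
    · have hnq : ¬ p ∣ 2 ^ a * m := by
        intro h
        rcases hp.dvd_mul.mp h with h | h
        · exact hpnotpow a h
        · exact hpm h
      have hloop : pvDivLoopA p (2 ^ a * m) 0 = (2 ^ a * m, (0 : Int)) := by
        have := pvDivLoopA_eq p (2 ^ a * m) (by omega) (by positivity) (2 ^ a * m) 0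
          (by ring) hnq
        simpa using this
      have hmd : m ∣ rest.prod := by
        have hcop : IsCoprime p m := (Prime.coprime_iff_not_dvd hp).mpr hpm
        exact IsCoprime.dvd_of_dvd_mul_left hcop.symm hd'
      rw [pvFermatFoldA]
      simp only [hloop]
      norm_num
      exact ih a m hrest hpwrest hm hmd

-- general shape of a successful fold: k = d * q with d dividing the list product
lemma pvFoldSomeSpec :
    ∀ (ps : List Int) (k q : Int), (∀ p ∈ ps, 2 ≤ p) → 0 < k →
      pvFermatFoldA ps k = some q → ∃ d, 0 < d ∧ k = d * q ∧ d ∣ ps.prod ∧ 0 < q := by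
  intro ps
  induction ps with
  | nil =>
    intro k q _ hk h
    rw [pvFermatFoldA] at h
    obtain rfl : k = q := by simpa using h
    exact ⟨1, one_pos, by ring, by simp, hk⟩
  | cons p rest ih =>
    intro k q hps hk h
    have hp2 : 2 ≤ p := hps p (by simp)
    obtain ⟨q1, e, h1, h2, h3, h4⟩ := pvDivLoopA_spec p k 0 hp2 hk
    rw [pvFermatFoldA] at h
    simp only [h1] at h
    by_cases he : ((0 : Int) + (e : Int) ≥ 2)
    · rw [if_pos he] at h
      cases h
    · rw [if_neg he] at h
      obtain ⟨d, hd0, hdq, hdp, hq0⟩ := ih q1 q (fun r hr => hps r (by simp [hr])) h4 h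
      refine ⟨p ^ e * d, by positivity, by rw [h2, hdq]; ring, ?_, hq0⟩
      have hee : e ≤ 1 := by omega
      have hpe : (p : Int) ^ e ∣ p := by
        interval_cases e
        · simp
        · simp
      have : p ^ e * d ∣ p * rest.prod := mul_dvd_mul hpe hdp
      simpa using this

lemma pvNO_ne_YES : ("NO" : String) ≠ "YES" := by decide

-- the five concrete Fermat primes
lemma pvFermatFacts :
    (∀ p ∈ ([3, 5, 17, 257, 65537] : List Int), Prime p ∧ 2 < p) ∧
    ([3, 5, 17, 257, 65537] : List Int).Pairwise (fun x y => ¬ x ∣ y) ∧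
    ([3, 5, 17, 257, 65537] : List Int).prod = 4294967295 := by
  refine ⟨?_, by decide, by decide⟩
  intro p hp
  simp only [List.mem_cons, List.not_mem_nil, or_false] at hp
  rcases hp with rfl | rfl | rfl | rfl | rfl <;>
    exact ⟨Int.prime_iff_natAbs_prime.mpr (by norm_num), by norm_num⟩

-- core equivalence on all k outside D_
lemma pvMainEq (k : Int) (hD : ¬ D_is_constructible_polygon k) :
    is_constructible_polygon k = is_constructible_polygon_alt k := by
  by_cases hk3 : k < 3
  · simp [is_constructible_polygon, is_constructible_polygon_alt, hk3]
  · have hk0 : 0 < k := by omega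
    obtain ⟨hprimes, hpw, hprod⟩ := pvFermatFacts
    obtain ⟨a, hdec, hodd, hmpos⟩ := pvOddPartB_spec k hk0
    set m := pvOddPartB k with hm
    have hBif : is_constructible_polygon_alt k =
        if PySem.Int.mod 4294967295 m = 0 then "YES" else "NO" := by
      rw [is_constructible_polygon_alt, if_neg (by omega)]
    by_cases hdvd : m ∣ 4294967295
    · -- B says YES; A must say YES too (D_ excluded the only exception)
      have hB : is_constructible_polygon_alt k = "YES" := by
        rw [hBif, if_pos ((PySem.Int.mod_eq_zero_iff_dvd _ _).mpr hdvd)]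
      have hfold : pvFermatFoldA [3, 5, 17, 257, 65537] k = some (2 ^ a) := by
        rw [hdec]
        exact pvFoldOfDiv _ a m hprimes hpw hmpos (hprod ▸ hdvd)
      have ha1 : a ≠ 1 := by
        intro ha
        subst ha
        have hm1 : m ≠ 1 := by
          intro h1
          rw [h1] at hdec
          omega
        apply hD
        refine ⟨by omega, ?_, ?_⟩
        · have hm2 : m % 2 = 1 := by
            rcases Int.emod_two_eq m with h | h
            · exact absurd (Int.dvd_of_emod_eq_zero h) hodd
            · exact h
          omega
        · have hhalf : k / 2 = m := by
            rw [hdec, pow_one, Int.mul_ediv_cancel_left _ (by norm_num)]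
          rwa [hhalf]
      have hpow2 : (2 : Int) ^ a ≠ 2 := by
        intro h
        have := pvValUnique 2 (by norm_num) a 1 1 1 (by norm_num) (by norm_num)
          (by simpa using h)
        omega
      have hs : pvStrip2A (2 ^ a) = 1 := by
        simpa using pvStrip2A_odd_mul_pow a 1 one_pos (by norm_num)
      have hA : is_constructible_polygon k = "YES" := by
        rw [is_constructible_polygon, if_neg (by omega), hfold]
        simp [hpow2, hs]
      rw [hA, hB]
    · -- B says NO; A cannot say YES
      have hB : is_constructible_polygon_alt k = "NO" := by
        rw [hBif, if_neg (fun h => hdvd ((PySem.Int.mod_eq_zero_iff_dvd _ _).mp h))]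
      rw [hB, is_constructible_polygon, if_neg (by omega)]
      cases hF : pvFermatFoldA [3, 5, 17, 257, 65537] k with
      | none => rfl
      | some q =>
        obtain ⟨d, hd0, hkdq, hdN, hq0⟩ :=
          pvFoldSomeSpec _ k q (fun p hp => le_of_lt (hprimes p hp).2) hk0 hF
        have hdN' : d ∣ 4294967295 := hprod ▸ hdN
        have hdodd : ¬ (2 : Int) ∣ d := by
          intro h2d
          have : (2 : Int) ∣ 4294967295 := h2d.trans hdN'
          norm_num at this
        have hq2 : q ≠ 2 := by
          intro hq2
          subst hq2
          apply hdvd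
          have hop : pvOddPartB k = d := by
            rw [hkdq, (by ring : d * 2 = 2 ^ 1 * d)]
            exact pvOddPartB_odd_mul_pow 1 d hd0 hdodd
          rw [hm, hop]
          exact hdN'
        have hs1 : pvStrip2A q ≠ 1 := by
          intro hs1
          obtain ⟨b, hqdec, _, _⟩ := pvStrip2A_spec q hq0
          rw [hs1, mul_one] at hqdec
          apply hdvd
          have hop : pvOddPartB k = d := by
            rw [hkdq, hqdec, (by ring : d * 2 ^ b = 2 ^ b * d)]
            exact pvOddPartB_odd_mul_pow b d hd0 hdodd
          rw [hm, hop]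
          exact hdN'
        show (if q = 2 then "NO" else if pvStrip2A q = 1 then "YES" else "NO") = "NO"
        rw [if_neg hq2, if_neg hs1]

-- inside D_ the two programs always disagree: A says "NO", B says "YES"
lemma pvInsideD (k : Int) (hD : D_is_constructible_polygon k) :
    is_constructible_polygon k = "NO" ∧ is_constructible_polygon_alt k = "YES" := by
  obtain ⟨hk2, hmod4, hdvd⟩ := hD
  set m := k / 2 with hm
  have hkeq : k = 2 * m := by omega
  have hmodd : ¬ (2 : Int) ∣ m := by
    rintro ⟨t, ht⟩
    omega
  have hmpos : 0 < m := by omega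
  obtain ⟨hprimes, hpw, hprod⟩ := pvFermatFacts
  have hfold : pvFermatFoldA [3, 5, 17, 257, 65537] k = some 2 := by
    have := pvFoldOfDiv [3, 5, 17, 257, 65537] 1 m hprimes hpw hmpos (hprod ▸ hdvd)
    rw [hkeq, (by ring : 2 * m = 2 ^ 1 * m)]
    simpa using this
  constructor
  · rw [is_constructible_polygon, if_neg (by omega), hfold]
    simp
  · have hop : pvOddPartB k = m := by
      rw [hkeq, (by ring : 2 * m = 2 ^ 1 * m)]
      exact pvOddPartB_odd_mul_pow 1 m hmpos hmodd
    rw [is_constructible_polygon_alt, if_neg (by omega), hop,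
      if_pos ((PySem.Int.mod_eq_zero_iff_dvd _ _).mpr hdvd)]

-- ===== VERDICT (by name: the statement is the Claim_ definition above) =====
theorem is_constructible_polygon_spec : Claim_unchanged_is_constructible_polygon := by
  intro k _ hD
  exact pvMainEq k hD

theorem is_constructible_polygon_changed : Claim_changed_is_constructible_polygon := by
  unfold Claim_changed_is_constructible_polygon
  obtain ⟨hA, hB⟩ := pvInsideD 6 (by decide)
  exact ⟨by decide, by decide, hA, hB, by decide⟩

theorem is_constructible_polygon_tight : Claim_exact_is_constructible_polygon := by
  intro k _ hD
  obtain ⟨hA, hB⟩ := pvInsideD k hD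
  rw [hA, hB]
  exact pvNO_ne_YES
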